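-- pv_equiv track=rewrite | github.com/thierryxc/dayu-agent | dayu/engine/tools/web_fetch_orchestrator.py | _html_text_has_client_rendering_markers
-- ===== SOURCE A (Python) =====
-- def _html_text_has_client_rendering_markers(raw_text: str) -> bool:
--     """判断 HTML 文本是否更像需要真实浏览器渲染的前端壳页。
--
--     Args:
--         raw_text: 原始 HTML 或其文本摘录。
--
--     Returns:
--         命中典型客户端渲染壳页特征时返回 `True`。
--
--     Raises:
--         无。
--     """
--
--     normalized_text = str(raw_text or "").lower()
--     if not normalized_text:
--         return False
--     return any(
--         marker in normalized_text
--         for marker in (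
--             "<script",
--             'id="app"',
--             "id='app'",
--             'id="root"',
--             "id='root'",
--             "__next",
--             "chunk-vendors",
--             "webpack",
--             "hydrate",
--             "render(",
--             "#/",
--         )
--     )
-- ===== SOURCE B (Python) =====
-- _MARKERS = (
--     "<script",
--     'id="app"',
--     "id='app'",
--     'id="root"',
--     "id='root'",
--     "__next",
--     "chunk-vendors",
--     "webpack",
--     "hydrate",
--     "render(",
--     "#/",
-- )
--
--
-- def _html_text_has_client_rendering_markers(raw_text: str) -> bool:
--     # One left-to-right pass over the text: at each position, test whether any
--     # marker starts there (instead of one full substring scan per marker).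
--     text = str(raw_text or "").lower()
--     return any(
--         any(text.startswith(marker, i) for marker in _MARKERS)
--         for i in range(len(text))
--     )
-- ===== Notes on version B (the rewrite author's own statement) =====
-- stated objective: alternative
-- what changed: A checks each marker against the whole text with a separate substring-containment scan; B makes a single left-to-right pass over the text, testing at each position whether any marker starts there, with no empty-string special case.
import Mathlib
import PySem

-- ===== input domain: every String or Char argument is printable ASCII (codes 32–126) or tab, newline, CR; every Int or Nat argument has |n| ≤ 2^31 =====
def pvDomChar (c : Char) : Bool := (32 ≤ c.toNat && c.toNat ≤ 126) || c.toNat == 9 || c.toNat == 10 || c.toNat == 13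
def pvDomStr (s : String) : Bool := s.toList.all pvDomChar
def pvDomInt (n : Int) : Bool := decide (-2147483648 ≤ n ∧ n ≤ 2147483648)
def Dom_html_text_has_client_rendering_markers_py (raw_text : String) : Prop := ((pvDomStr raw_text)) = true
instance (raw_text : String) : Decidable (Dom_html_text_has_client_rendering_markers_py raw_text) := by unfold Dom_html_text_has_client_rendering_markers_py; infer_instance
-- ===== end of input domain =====

-- B replaces A's per-marker substring scans by a single left-to-right pass testing all
-- markers at each position (objective: alternative traversal, same exact result).

-- ===== PORT A =====
-- the tuple of markers A iterates over
def pvMarkersA : List String :=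
  ["<script", "id=\"app\"", "id='app'", "id=\"root\"", "id='root'",
   "__next", "chunk-vendors", "webpack", "hydrate", "render(", "#/"]

def html_text_has_client_rendering_markers_py (raw_text : String) : Bool :=
  -- normalized_text = str(raw_text or "").lower()  (raw_text is a str, so 'or ""' is identity)
  let normalized_text := PySem.Str.lower raw_text
  -- if not normalized_text: return False
  if normalized_text.toList = [] then false
  else
    -- any(marker in normalized_text for marker in (...))
    pvMarkersA.any (fun marker => PySem.Str.isIn marker normalized_text)

-- ===== PORT B =====
def pvMarkersB : List String :=
  ["<script", "id=\"app\"", "id='app'", "id=\"root\"", "id='root'",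
   "__next", "chunk-vendors", "webpack", "hydrate", "render(", "#/"]

-- the single pass: for each position i (each suffix), does some marker start there?
def pvScanB : List Char → Bool
  | [] => false
  | c :: rest =>
      pvMarkersB.any (fun marker => PySem.Chars.startswith (c :: rest) marker.toList)
      || pvScanB rest

def html_text_has_client_rendering_markers_py_alt (raw_text : String) : Bool :=
  -- text = str(raw_text or "").lower(); any over positions of any over markers
  pvScanB (PySem.Str.lower raw_text).toList

-- ===== PRECONDITION & SPEC =====
def Spec_html_text_has_client_rendering_markers_py (raw_text : String) (out : Bool) : Prop := out = html_text_has_client_rendering_markers_py_alt raw_text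
instance (raw_text : String) (out : Bool) : Decidable (Spec_html_text_has_client_rendering_markers_py raw_text out) := by unfold Spec_html_text_has_client_rendering_markers_py; infer_instance

-- ===== CLAIM (what is proved, stated in full; the proofs are below) =====
def Claim_equal_html_text_has_client_rendering_markers_py : Prop := ∀ (raw_text : String), Dom_html_text_has_client_rendering_markers_py raw_text → Spec_html_text_has_client_rendering_markers_py raw_text (html_text_has_client_rendering_markers_py raw_text)

-- ===== LEMMAS AND PROOFS =====

-- the scan over suffixes decides exactly "some marker is an infix"
theorem pvScanB_eq_any_isIn (s : List Char) :
    pvScanB s = pvMarkersB.any (fun marker => PySem.Chars.isIn marker.toList s) := by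
  induction s with
  | nil => decide
  | cons c rest ih =>
      rw [pvScanB, ih]
      apply Bool.eq_iff_iff.mpr
      simp only [Bool.or_eq_true, List.any_eq_true, PySem.Chars.isIn_iff_infix,
        PySem.Chars.startswith_iff, List.infix_cons_iff]
      constructor
      · rintro (⟨m, hm, h⟩ | ⟨m, hm, h⟩)
        · exact ⟨m, hm, Or.inl h⟩
        · exact ⟨m, hm, Or.inr h⟩
      · rintro ⟨m, hm, h | h⟩
        · exact Or.inl ⟨m, hm, h⟩
        · exact Or.inr ⟨m, hm, h⟩

-- ===== VERDICT (by name: the statement is the Claim_ definition above) =====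
theorem html_text_has_client_rendering_markers_py_spec : Claim_equal_html_text_has_client_rendering_markers_py := by
  intro raw_text _
  unfold Spec_html_text_has_client_rendering_markers_py
  unfold html_text_has_client_rendering_markers_py html_text_has_client_rendering_markers_py_alt
  rw [pvScanB_eq_any_isIn]
  by_cases h : (PySem.Str.lower raw_text).toList = []
  · simp only [h, if_pos]
    rw [show pvMarkersB.any (fun marker => PySem.Chars.isIn marker.toList ([] : List Char)) = false by decide]
  · rw [if_neg h]
    simp only [PySem.Str.isIn_eq]
    rfl
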